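-- pv_equiv track=rewrite | github.com/tschmidt95/Florida_Property_Scraper | src/florida_property_scraper/backend/native/extract.py | _extract_owner_address_from_pairs
-- ===== SOURCE A (Python) =====
-- def _extract_owner_address_from_pairs(pairs):
--     owner = ""
--     address = ""
--     for label, value in pairs:
--         if "owner" in label and not owner:
--             owner = value
--         if "address" in label and not address:
--             address = value
--     return owner, address
-- ===== SOURCE B (Python) =====
-- def _extract_owner_address_from_pairs(pairs):
--     pairs = list(pairs)
--     owner = next((v for l, v in pairs if "owner" in l and v), "")
--     address = next((v for l, v in pairs if "address" in l and v), "")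
--     return owner, address
-- ===== Notes on version B (the rewrite author's own statement) =====
-- stated objective: idiomatic
-- what changed: Replaced the single stateful two-branch loop with two independent short-circuiting next() scans over the materialized pair list (skipping empty values, which A's falsiness test also skips).
import Mathlib
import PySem

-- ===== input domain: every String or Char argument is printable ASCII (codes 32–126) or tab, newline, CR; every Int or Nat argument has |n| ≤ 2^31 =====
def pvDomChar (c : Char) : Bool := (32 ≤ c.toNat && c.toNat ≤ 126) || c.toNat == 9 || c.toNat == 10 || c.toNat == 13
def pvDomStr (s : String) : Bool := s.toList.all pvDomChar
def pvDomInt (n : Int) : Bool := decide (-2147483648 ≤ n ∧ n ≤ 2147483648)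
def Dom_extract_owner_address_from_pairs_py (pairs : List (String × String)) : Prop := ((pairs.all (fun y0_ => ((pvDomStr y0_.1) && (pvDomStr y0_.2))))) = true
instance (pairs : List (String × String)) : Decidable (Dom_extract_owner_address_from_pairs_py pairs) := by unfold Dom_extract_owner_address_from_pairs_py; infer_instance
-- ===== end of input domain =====

-- B replaces A's single stateful two-branch loop with two independent short-circuiting scans (idiomatic; same O(n) cost).


-- ===== PORT A =====
-- one fold over the pairs carrying the (owner, address) state, branches in A's order
def extract_owner_address_from_pairs_py (pairs : List (String × String)) : String × String :=
  pairs.foldl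
    (fun st p =>
      let owner := if PySem.Str.isIn "owner" p.1 && (st.1 == "") then p.2 else st.1
      let address := if PySem.Str.isIn "address" p.1 && (st.2 == "") then p.2 else st.2
      (owner, address))
    ("", "")

-- ===== PORT B =====
-- next((v for l, v in pairs if key in l and v), "")
def pvFirstVal (key : String) (pairs : List (String × String)) : String :=
  (pairs.findSome? (fun p =>
    if PySem.Str.isIn key p.1 && !(p.2 == "") then some p.2 else none)).getD ""

def extract_owner_address_from_pairs_py_alt (pairs : List (String × String)) : String × String :=
  (pvFirstVal "owner" pairs, pvFirstVal "address" pairs)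

-- ===== PRECONDITION & SPEC =====
def Spec_extract_owner_address_from_pairs_py (pairs : List (String × String)) (out : String × String) : Prop := out = extract_owner_address_from_pairs_py_alt pairs
instance (pairs : List (String × String)) (out : String × String) : Decidable (Spec_extract_owner_address_from_pairs_py pairs out) := by unfold Spec_extract_owner_address_from_pairs_py; infer_instance

-- ===== CLAIM (what is proved, stated in full; the proofs are below) =====
def Claim_equal_extract_owner_address_from_pairs_py : Prop := ∀ (pairs : List (String × String)), Dom_extract_owner_address_from_pairs_py pairs → Spec_extract_owner_address_from_pairs_py pairs (extract_owner_address_from_pairs_py pairs)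

-- ===== LEMMAS AND PROOFS =====

-- invariant of A's fold: a non-empty accumulator is final; an empty one becomes the first
-- non-empty value under a matching label (an empty matching value leaves the accumulator empty,
-- exactly as B's scan skips it)
theorem pv_fold_char (pairs : List (String × String)) (o a : String) :
    pairs.foldl
      (fun st p =>
        let owner := if PySem.Str.isIn "owner" p.1 && (st.1 == "") then p.2 else st.1
        let address := if PySem.Str.isIn "address" p.1 && (st.2 == "") then p.2 else st.2
        (owner, address))
      (o, a)
    = ((if o == "" then pvFirstVal "owner" pairs else o),
       (if a == "" then pvFirstVal "address" pairs else a)) := by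
  induction pairs generalizing o a with
  | nil => simp [pvFirstVal]
  | cons p rest ih =>
    simp only [List.foldl_cons, ih]
    unfold pvFirstVal
    simp only [List.findSome?_cons]
    by_cases ho : o = "" <;> by_cases ha : a = "" <;>
      by_cases hmo : PySem.Str.isIn "owner" p.1 = true <;>
      by_cases hma : PySem.Str.isIn "address" p.1 = true <;>
      by_cases hv : p.2 = "" <;>
      simp_all [pvFirstVal]

-- ===== VERDICT (by name: the statement is the Claim_ definition above) =====
theorem extract_owner_address_from_pairs_py_spec : Claim_equal_extract_owner_address_from_pairs_py := by
  intro pairs _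
  show _ = _
  unfold extract_owner_address_from_pairs_py extract_owner_address_from_pairs_py_alt
  rw [pv_fold_char]
  simp
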